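-- pv_equiv track=rewrite | github.com/KeaMeng-ING/homework_8_collab | exercise-3.py | remove_all_after
-- ===== SOURCE A (Python) =====
-- def remove_all_after(numbers, n):
--     new_list = []
--     if len(numbers) == 0:
--         return []
--     for num in numbers:
--         new_list.append(num)
--         if num == n:
--             break
--     return new_list
-- ===== SOURCE B (Python) =====
-- def remove_all_after(numbers, n):
--     try:
--         i = numbers.index(n)
--     except ValueError:
--         return list(numbers)
--     return numbers[:i + 1]
-- ===== Notes on version B (the rewrite author's own statement) =====
-- stated objective: simpler
-- what changed: Replaces the per-element append loop with a break by a two-step formulation: find the first occurrence with numbers.index(n) (ValueError means n absent) and return one slice numbers[:i+1], or a copy of the whole list.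
import Mathlib
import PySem

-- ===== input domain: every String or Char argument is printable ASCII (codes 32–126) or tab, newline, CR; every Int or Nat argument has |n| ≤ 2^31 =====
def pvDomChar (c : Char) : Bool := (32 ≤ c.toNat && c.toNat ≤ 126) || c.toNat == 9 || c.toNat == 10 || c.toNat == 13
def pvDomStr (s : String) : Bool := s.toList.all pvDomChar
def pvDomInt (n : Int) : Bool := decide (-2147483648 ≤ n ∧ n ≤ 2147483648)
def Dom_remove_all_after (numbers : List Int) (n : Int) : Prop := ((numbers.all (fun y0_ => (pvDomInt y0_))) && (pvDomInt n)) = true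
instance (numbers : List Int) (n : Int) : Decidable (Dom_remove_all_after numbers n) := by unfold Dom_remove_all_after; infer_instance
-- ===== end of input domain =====

-- B replaces A's append-and-break accumulator loop by index-then-slice: find the
-- first occurrence of n, then copy with one slice (simpler decomposition, same cost).

-- ===== PORT A =====
-- the for-loop with new_list.append(num) and break, as structural recursion over numbers
def removeAllAfterLoopA (n : Int) : List Int → List Int → List Int
  | acc, [] => acc
  | acc, num :: rest =>
    let acc' := acc ++ [num]
    if num = n then acc' else removeAllAfterLoopA n acc' rest

def remove_all_after (numbers : List Int) (n : Int) : List Int :=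
  if numbers.length = 0 then [] else removeAllAfterLoopA n [] numbers

-- ===== PORT B =====
def remove_all_after_alt (numbers : List Int) (n : Int) : List Int :=
  match PySem.List.index? numbers n with
  | some i => PySem.List.slice numbers none (some ((i : Int) + 1))   -- numbers[:i+1]
  | none => numbers                                                   -- list(numbers)

-- ===== PRECONDITION & SPEC =====
def Spec_remove_all_after (numbers : List Int) (n : Int) (out : List Int) : Prop := out = remove_all_after_alt numbers n
instance (numbers : List Int) (n : Int) (out : List Int) : Decidable (Spec_remove_all_after numbers n out) := by unfold Spec_remove_all_after; infer_instance

-- ===== CLAIM (what is proved, stated in full; the proofs are below) =====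
def Claim_equal_remove_all_after : Prop := ∀ (numbers : List Int) (n : Int), Dom_remove_all_after numbers n → Spec_remove_all_after numbers n (remove_all_after numbers n)

-- ===== LEMMAS AND PROOFS =====

-- cons recurrence of the index-then-slice formulation
theorem alt_nil (n : Int) : remove_all_after_alt [] n = [] := rfl

theorem alt_cons (x : Int) (xs : List Int) (n : Int) :
    remove_all_after_alt (x :: xs) n =
      x :: (if x = n then [] else remove_all_after_alt xs n) := by
  unfold remove_all_after_alt
  by_cases h : x = n
  · subst h
    rw [PySem.List.index?_cons_self, if_pos rfl]
    show PySem.List.slice (x :: xs) none (some (((0 : Nat) : Int) + 1)) = [x]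
    rw [PySem.List.slice_to _ (by omega)]
    norm_num
  · rw [PySem.List.index?_cons_of_ne xs h, if_neg h]
    cases hi : PySem.List.index? xs n with
    | none => rfl
    | some i =>
      show PySem.List.slice (x :: xs) none (some (((i + 1 : Nat) : Int) + 1)) =
        x :: PySem.List.slice xs none (some ((i : Int) + 1))
      rw [PySem.List.slice_to _ (by omega), PySem.List.slice_to _ (by omega)]
      have h1 : (((i + 1 : Nat) : Int) + 1).toNat = i + 2 := by omega
      have h2 : (((i : Nat) : Int) + 1).toNat = i + 1 := by omega
      rw [h1, h2, List.take_succ_cons]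

theorem loopA_eq_alt (n : Int) (xs : List Int) :
    ∀ acc, removeAllAfterLoopA n acc xs = acc ++ remove_all_after_alt xs n := by
  induction xs with
  | nil => intro acc; simp [removeAllAfterLoopA, alt_nil]
  | cons x rest ih =>
    intro acc
    rw [alt_cons]
    by_cases h : x = n
    · simp [removeAllAfterLoopA, h]
    · simp [removeAllAfterLoopA, h, ih]

-- ===== VERDICT (by name: the statement is the Claim_ definition above) =====
theorem remove_all_after_spec : Claim_equal_remove_all_after := by
  intro numbers n _
  unfold Spec_remove_all_after remove_all_after
  cases numbers with
  | nil => simp [alt_nil]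
  | cons x xs => simp [loopA_eq_alt]
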